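-- pv_equiv track=rewrite | github.com/armenmelkonyan90/for-python-tasks | Python/30.01.22/9join.py | my_join
-- ===== SOURCE A (Python) =====
-- def my_join(mstr, sym):
--     nmstr = ""
--     for i in mstr:
--         if i == " ":
--             nmstr += sym
--         else:
--             nmstr += i
--     return nmstr
-- ===== SOURCE B (Python) =====
-- def my_join(mstr, sym):
--     return sym.join(mstr.split(" "))
-- ===== Notes on version B (the rewrite author's own statement) =====
-- stated objective: idiomatic
-- what changed: Replaces the per-character scan-and-branch string accumulation with the standard tokenize-then-join idiom: split on the space delimiter and rejoin the segments with sym (C-level split/join instead of a Python loop with repeated +=).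
import Mathlib
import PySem

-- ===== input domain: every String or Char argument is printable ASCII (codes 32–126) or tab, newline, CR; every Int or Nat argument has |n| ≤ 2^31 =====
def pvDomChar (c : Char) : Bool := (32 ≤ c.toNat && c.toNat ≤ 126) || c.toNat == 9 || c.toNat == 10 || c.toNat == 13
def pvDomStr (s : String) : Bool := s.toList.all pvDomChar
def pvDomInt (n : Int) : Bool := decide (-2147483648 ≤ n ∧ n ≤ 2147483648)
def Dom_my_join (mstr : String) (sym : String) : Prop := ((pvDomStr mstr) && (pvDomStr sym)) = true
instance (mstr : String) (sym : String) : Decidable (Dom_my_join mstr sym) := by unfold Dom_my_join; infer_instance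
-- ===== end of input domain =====

-- ===== PORT A =====
-- B replaces A's per-character scan-and-branch accumulation by split-on-space + join (idiomatic).
def my_join (mstr : String) (sym : String) : String :=
  String.ofList (mstr.toList.foldl
    (fun nmstr i => if i == ' ' then nmstr ++ sym.toList else nmstr ++ [i]) [])

-- ===== PORT B =====
def my_join_alt (mstr : String) (sym : String) : String :=
  match PySem.Str.split? mstr " " with
  | some parts => PySem.Str.join sym parts
  | none => ""   -- unreachable: the separator " " is nonempty

-- ===== PRECONDITION & SPEC =====
def Spec_my_join (mstr : String) (sym : String) (out : String) : Prop := out = my_join_alt mstr sym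
instance (mstr : String) (sym : String) (out : String) : Decidable (Spec_my_join mstr sym out) := by unfold Spec_my_join; infer_instance

-- ===== CLAIM (what is proved, stated in full; the proofs are below) =====
def Claim_equal_my_join : Prop := ∀ (mstr : String) (sym : String), Dom_my_join mstr sym → Spec_my_join mstr sym (my_join mstr sym)

-- ===== LEMMAS AND PROOFS =====

-- ===== VERDICT (by name: the statement is the Claim_ definition above) =====

theorem go_acc (sep : List Char) (fuel : Nat) :
    ∀ (l cur : List Char) (acc : List (List Char)),
    PySem.Chars.splitOn.go sep fuel l cur acc
      = acc.reverse ++ PySem.Chars.splitOn.go sep fuel l cur [] := by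
  induction fuel with
  | zero => intro l cur acc; simp [PySem.Chars.splitOn.go.eq_def]
  | succ n ih =>
    intro l cur acc
    cases l with
    | nil => simp [PySem.Chars.splitOn.go.eq_def]
    | cons c rest =>
      conv_lhs => rw [PySem.Chars.splitOn.go.eq_def]
      conv_rhs => rw [PySem.Chars.splitOn.go.eq_def]
      by_cases h : sep.isPrefixOf (c :: rest) = true
      · simp only [h, if_true]
        rw [ih _ [] (cur.reverse :: acc), ih _ [] [cur.reverse]]
        simp
      · simp only [h]
        exact ih rest (c :: cur) acc

theorem go_ne_nil (sep : List Char) (fuel : Nat) :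
    ∀ (l cur : List Char) (acc : List (List Char)),
    PySem.Chars.splitOn.go sep fuel l cur acc ≠ [] := by
  induction fuel with
  | zero => intro l cur acc; simp [PySem.Chars.splitOn.go.eq_def]
  | succ n ih =>
    intro l cur acc
    cases l with
    | nil => simp [PySem.Chars.splitOn.go.eq_def]
    | cons c rest =>
      rw [PySem.Chars.splitOn.go.eq_def]
      by_cases h : sep.isPrefixOf (c :: rest) = true
      · simp only [h, if_true]; exact ih _ _ _
      · simp only [h]; exact ih _ _ _

def seg (sym : List Char) (c : Char) : List Char :=
  if c == ' ' then sym else [c]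

theorem join_go (sym : List Char) :
    ∀ (l : List Char) (fuel : Nat) (cur : List Char), l.length < fuel →
    PySem.Chars.join sym (PySem.Chars.splitOn.go [' '] fuel l cur [])
      = cur.reverse ++ l.flatMap (seg sym) := by
  intro l
  induction l with
  | nil =>
    intro fuel cur hf
    cases fuel with
    | zero => omega
    | succ n =>
      simp [PySem.Chars.splitOn.go.eq_def, PySem.Chars.join_singleton]
  | cons c rest ih =>
    intro fuel cur hf
    cases fuel with
    | zero => omega
    | succ n =>
      rw [PySem.Chars.splitOn.go.eq_def]
      by_cases hc : c = ' '
      · have hp : [' '].isPrefixOf (c :: rest) = true := by simp [hc, List.isPrefixOf]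
        simp only [hp, if_true]
        have hd : List.drop [' '].length (c :: rest) = rest := by simp
        rw [hd, go_acc [' '] n rest [] [cur.reverse]]
        have hlt : rest.length < n := by simp at hf; omega
        have hrec := ih n [] hlt
        cases hgo : PySem.Chars.splitOn.go [' '] n rest [] [] with
        | nil => exact absurd hgo (go_ne_nil _ _ _ _ _)
        | cons x ys =>
          rw [hgo] at hrec
          simp only [List.reverse_nil, List.nil_append] at hrec
          simp only [List.reverse_cons, List.reverse_nil, List.nil_append,
            List.singleton_append]
          rw [PySem.Chars.join_cons_cons, hrec]
          simp [seg, hc, List.append_assoc]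
      · have hp : [' '].isPrefixOf (c :: rest) = false := by
          simp [List.isPrefixOf]
          exact fun h => absurd h.symm hc
        simp only [hp, Bool.false_eq_true, if_false]
        rw [ih n (c :: cur) (Nat.lt_of_succ_lt_succ hf)]
        simp [seg, hc]

theorem join_splitOn (sym cs : List Char) :
    PySem.Chars.join sym (PySem.Chars.splitOn cs [' ']) = cs.flatMap (seg sym) := by
  unfold PySem.Chars.splitOn
  simpa using join_go sym cs (cs.length + 1) [] (by omega)

theorem my_join_spec : Claim_equal_my_join := by
  intro mstr sym _
  unfold Spec_my_join my_join my_join_alt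
  have hsep : ((" " : String).toList) = [' '] := by decide
  simp only [PySem.Str.split?, PySem.Chars.split?, hsep]
  simp only [List.isEmpty_cons, Bool.false_eq_true, if_false, Option.map_some,
    PySem.Str.join]
  rw [List.map_map]
  have hmap : ∀ (xs : List (List Char)),
      List.map (String.toList ∘ String.ofList) xs = xs := by
    intro xs
    induction xs with
    | nil => rfl
    | cons y ys ihy => simp [Function.comp, ihy]
  rw [hmap]
  congr 1
  have hfun : (fun (nmstr : List Char) (i : Char) =>
        if i == ' ' then nmstr ++ sym.toList else nmstr ++ [i])
      = (fun acc i => acc ++ seg sym.toList i) := by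
    funext a b
    by_cases h : (b == ' ') = true <;> simp [seg, h]
  rw [hfun, PySem.List.foldl_append_eq_flatMap, join_splitOn]
  simp
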